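-- pv_equiv track=rewrite | github.com/dkanzariya/Python | LeetCode_Week.py | minimum_time_to_execute_all_tasks
-- ===== SOURCE A (Python) =====
-- def minimum_time_to_execute_all_tasks(processorTime, tasks):
--     processorTime.sort()
--     tasks.sort(reverse = True)
--     new_list = [x for x in processorTime for _ in range(4)]
--     result = []
--     for i in range(len(new_list)):
--         result.append(new_list[i] + tasks[i])
--
--     return max(result)
-- ===== SOURCE B (Python) =====
-- def minimum_time_to_execute_all_tasks(processorTime, tasks):
--     # Same two in-place sorts as A (same observable mutation); then one pass over
--     # processors with a running best and a stride-4 cursor into tasks, instead of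
--     # A's 4x-expanded processor list, full pairwise-sum list and max() call.
--     processorTime.sort()
--     tasks.sort(reverse=True)
--     best = processorTime[0] + tasks[0]
--     j = 0
--     for p in processorTime:
--         cand = p + tasks[j]
--         if cand > best:
--             best = cand
--         j += 4
--     return best
-- ===== Notes on version B (the rewrite author's own statement) =====
-- stated objective: simpler
-- what changed: B replaces A's 4x-expanded processor list, full pairwise sum list and final max() by a single accumulator loop over processors with a stride-4 cursor into the descending tasks (the largest task of each block of 4 is its first element), touching n pairs instead of 4n.
import Mathlib
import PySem

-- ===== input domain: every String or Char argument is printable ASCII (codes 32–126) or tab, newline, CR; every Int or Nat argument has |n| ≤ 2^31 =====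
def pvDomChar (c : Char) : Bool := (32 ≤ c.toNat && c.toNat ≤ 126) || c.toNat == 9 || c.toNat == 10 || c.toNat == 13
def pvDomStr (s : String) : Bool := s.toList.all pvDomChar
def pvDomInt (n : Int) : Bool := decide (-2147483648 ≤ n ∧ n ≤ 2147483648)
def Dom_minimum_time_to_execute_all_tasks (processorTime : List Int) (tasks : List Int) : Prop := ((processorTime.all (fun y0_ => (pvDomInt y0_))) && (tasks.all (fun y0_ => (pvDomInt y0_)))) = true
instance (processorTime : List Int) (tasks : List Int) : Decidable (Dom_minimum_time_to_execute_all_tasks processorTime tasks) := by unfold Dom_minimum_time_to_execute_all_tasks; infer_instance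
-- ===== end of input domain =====

-- B replaces A's 4x-expanded processor list, full pairwise-sum list and max() by a single
-- accumulator pass over processors with a stride-4 cursor into tasks (simpler). Both A and B
-- sort their list arguments in place; the equivalence proved is about the return value
-- (the mutation is identical anyway).

-- ===== PORT A =====
def minimum_time_to_execute_all_tasks (processorTime : List Int) (tasks : List Int) : Int :=
  let pt := PySem.List.sorted processorTime (fun x => x) false
  let ts := PySem.List.sorted tasks (fun x => x) true
  let new_list := pt.flatMap (fun x => (PySem.List.pyRange 0 4 1).map (fun _ => x))
  let result := (PySem.List.pyRange 0 (new_list.length : Int) 1).foldl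
      (fun acc i => acc ++ [PySem.List.pyGetD new_list i 0 + PySem.List.pyGetD ts i 0]) []
  (PySem.List.max? result (fun x => x)).getD 0

-- ===== PORT B =====
-- the 'for p in processorTime' loop carrying (best, cursor j); tasks[j] is pyGetD
-- (exact under Pre_, where j is always in range)
def pvAltGo (ps : List Int) (ts : List Int) (j : Int) (best : Int) : Int :=
  match ps with
  | [] => best
  | p :: ps' =>
      let cand := p + PySem.List.pyGetD ts j 0
      pvAltGo ps' ts (j + 4) (if cand > best then cand else best)

def minimum_time_to_execute_all_tasks_alt (processorTime : List Int) (tasks : List Int) : Int :=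
  let pt := PySem.List.sorted processorTime (fun x => x) false
  let ts := PySem.List.sorted tasks (fun x => x) true
  pvAltGo pt ts 0 (PySem.List.pyGetD pt 0 0 + PySem.List.pyGetD ts 0 0)

-- ===== PRECONDITION & SPEC =====
-- Pre_ is exactly where the Python A returns: a nonempty processor list (else max([])
-- raises ValueError) and at least 4 tasks per processor (else tasks[i] raises IndexError).
def Pre_minimum_time_to_execute_all_tasks (processorTime : List Int) (tasks : List Int) : Prop :=
  processorTime ≠ [] ∧ 4 * processorTime.length ≤ tasks.length
instance (processorTime : List Int) (tasks : List Int) : Decidable (Pre_minimum_time_to_execute_all_tasks processorTime tasks) := by unfold Pre_minimum_time_to_execute_all_tasks; infer_instance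

def pvWitness_minimum_time_to_execute_all_tasks : List Int × List Int :=
  ([8, 10], [2, 2, 3, 1, 8, 7, 4, 5])

def Spec_minimum_time_to_execute_all_tasks (processorTime : List Int) (tasks : List Int) (out : Int) : Prop := out = minimum_time_to_execute_all_tasks_alt processorTime tasks
instance (processorTime : List Int) (tasks : List Int) (out : Int) : Decidable (Spec_minimum_time_to_execute_all_tasks processorTime tasks out) := by unfold Spec_minimum_time_to_execute_all_tasks; infer_instance

-- ===== CLAIM (what is proved, stated in full; the proofs are below) =====
def Claim_equal_minimum_time_to_execute_all_tasks : Prop := ∀ (processorTime : List Int) (tasks : List Int), Dom_minimum_time_to_execute_all_tasks processorTime tasks → Pre_minimum_time_to_execute_all_tasks processorTime tasks → Spec_minimum_time_to_execute_all_tasks processorTime tasks (minimum_time_to_execute_all_tasks processorTime tasks)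

-- ===== LEMMAS AND PROOFS =====

theorem pvExpand_eq (pt : List Int) :
    pt.flatMap (fun x => (PySem.List.pyRange 0 4 1).map (fun _ => x))
      = pt.flatMap (fun x => [x, x, x, x]) := by
  have h : PySem.List.pyRange 0 4 1 = [0, 1, 2, 3] := by decide
  simp [h]

theorem pvExpand_length (pt : List Int) :
    (pt.flatMap (fun x => [x, x, x, x])).length = 4 * pt.length := by
  induction pt with
  | nil => simp
  | cons p t ih => simp [ih]; omega

theorem pvExpand_getD (pt : List Int) (k : Nat) :
    (pt.flatMap (fun x => [x, x, x, x])).getD k 0 = pt.getD (k / 4) 0 := by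
  induction pt generalizing k with
  | nil => simp
  | cons p t ih =>
    match k with
    | 0 | 1 | 2 | 3 => simp
    | (k' + 4) =>
      have h4 : (k' + 4) / 4 = k' / 4 + 1 := by omega
      simp only [List.flatMap_cons, List.cons_append, List.nil_append,
        List.getD_cons_succ, h4]
      exact ih k'

-- the maximum over all 4n expanded pairs equals the maximum over the stride-4 pairs
theorem pvCore (P T : List Int) (hP : P ≠ [])
    (hT : List.Pairwise (fun a b => b ≤ a) T) (hlen : 4 * P.length ≤ T.length) :
    PySem.List.max? ((List.range (4 * P.length)).map
        (fun k => (P.flatMap (fun x => [x, x, x, x])).getD k 0 + T.getD k 0)) (fun x => x)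
      = PySem.List.max? ((List.range P.length).map
        (fun k => P.getD k 0 + T.getD (4 * k) 0)) (fun x => x) := by
  have hn : 0 < P.length := List.length_pos_iff.mpr hP
  set LA := (List.range (4 * P.length)).map
      (fun k => (P.flatMap (fun x => [x, x, x, x])).getD k 0 + T.getD k 0) with hLA
  set LB := (List.range P.length).map (fun k => P.getD k 0 + T.getD (4 * k) 0) with hLB
  have hTmono : ∀ i j : Nat, i ≤ j → j < T.length → T.getD j 0 ≤ T.getD i 0 := by
    intro i j hij hj
    rcases Nat.lt_or_ge i j with h | h
    · have hi : i < T.length := by omega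
      have := (List.pairwise_iff_getElem.mp hT) i j hi hj h
      rw [List.getD_eq_getElem T 0 hj, List.getD_eq_getElem T 0 hi]
      exact this
    · have : i = j := by omega
      subst this; rfl
  cases hA : PySem.List.max? LA (fun x => x) with
  | none =>
    exfalso
    have h0 := (PySem.List.max?_eq_none_iff LA (fun x => x)).mp hA
    rw [hLA] at h0
    simp at h0
    simp [h0] at hn
  | some a =>
    cases hB : PySem.List.max? LB (fun x => x) with
    | none =>
      exfalso
      have h0 := (PySem.List.max?_eq_none_iff LB (fun x => x)).mp hB
      rw [hLB] at h0
      simp at h0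
      simp [h0] at hn
    | some b =>
      have hamem := PySem.List.max?_mem hA
      have hbmem := PySem.List.max?_mem hB
      have hamax := PySem.List.max?_isMax hA
      have hbmax := PySem.List.max?_isMax hB
      congr 1
      apply le_antisymm
      · -- a ≤ b : every expanded pair is dominated by its block's stride pair
        obtain ⟨k, hk, hka⟩ := List.mem_map.mp hamem
        have hkr := List.mem_range.mp hk
        have hblock : 4 * (k / 4) ≤ k := by omega
        have hkT : k < T.length := by omega
        have h1 : (P.flatMap (fun x => [x, x, x, x])).getD k 0 = P.getD (k / 4) 0 :=
          pvExpand_getD P k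
        have h2 : T.getD k 0 ≤ T.getD (4 * (k / 4)) 0 := hTmono _ _ hblock hkT
        have hmemB : P.getD (k / 4) 0 + T.getD (4 * (k / 4)) 0 ∈ LB := by
          rw [hLB]
          exact List.mem_map.mpr ⟨k / 4, List.mem_range.mpr (by omega), rfl⟩
        have := hbmax _ hmemB
        calc a = P.getD (k / 4) 0 + T.getD k 0 := by rw [← hka, h1]
          _ ≤ P.getD (k / 4) 0 + T.getD (4 * (k / 4)) 0 := by omega
          _ ≤ b := this
      · -- b ≤ a : every stride pair occurs among the expanded pairs
        obtain ⟨j, hj, hjb⟩ := List.mem_map.mp hbmem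
        have hjr := List.mem_range.mp hj
        have hmemA : P.getD j 0 + T.getD (4 * j) 0 ∈ LA := by
          rw [hLA]
          refine List.mem_map.mpr ⟨4 * j, List.mem_range.mpr (by omega), ?_⟩
          rw [pvExpand_getD P (4 * j)]
          congr 2
          omega
        have := hamax _ hmemA
        calc b = P.getD j 0 + T.getD (4 * j) 0 := hjb.symm
          _ ≤ a := this

-- A's whole body equals the max? of the n stride-4 pair sums
theorem pvMainA (P T : List Int) (hPne : P ≠ [])
    (hTpair : List.Pairwise (fun a b => b ≤ a) T) (hlen4 : 4 * P.length ≤ T.length) :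
    (PySem.List.max?
      ((PySem.List.pyRange 0 (((P.flatMap (fun x => (PySem.List.pyRange 0 4 1).map (fun _ => x))).length : Nat) : Int) 1).foldl
        (fun acc i => acc ++ [PySem.List.pyGetD (P.flatMap (fun x => (PySem.List.pyRange 0 4 1).map (fun _ => x))) i 0
                              + PySem.List.pyGetD T i 0]) [])
      (fun x => x)).getD 0
    = (PySem.List.max?
        ((List.range P.length).map (fun k => P.getD k 0 + T.getD (4 * k) 0))
        (fun x => x)).getD 0 := by
  rw [pvExpand_eq, PySem.List.foldl_append_singleton_eq_map
      (f := fun i => PySem.List.pyGetD (P.flatMap (fun x => [x, x, x, x])) i 0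
                     + PySem.List.pyGetD T i 0)]
  rw [List.nil_append, pvExpand_length, PySem.List.pyRange_zero_natCast, List.map_map]
  have e1 : ((fun i => PySem.List.pyGetD (P.flatMap (fun x => [x, x, x, x])) i 0
              + PySem.List.pyGetD T i 0) ∘ fun k : Nat => (k : Int))
      = fun k : Nat => (P.flatMap (fun x => [x, x, x, x])).getD k 0 + T.getD k 0 := by
    funext k
    simp only [Function.comp_apply, PySem.List.pyGetD_natCast]
  rw [e1, pvCore P T hPne hTpair hlen4]

-- B's loop computes the running max of the stride-4 pair sums
theorem pvAltGo_eq (T : List Int) (ps : List Int) (s : Nat) (b : Int) :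
    pvAltGo ps T ((4 * s : Nat) : Int) b
      = List.foldl max b
          ((List.range ps.length).map (fun k => ps.getD k 0 + T.getD (4 * (s + k)) 0)) := by
  induction ps generalizing s b with
  | nil => simp [pvAltGo]
  | cons p ps' ih =>
    have hget : PySem.List.pyGetD T ((4 * s : Nat) : Int) 0 = T.getD (4 * s) 0 := by
      rw [PySem.List.pyGetD_natCast]
    have hstep : ((4 * s : Nat) : Int) + 4 = ((4 * (s + 1) : Nat) : Int) := by
      push_cast; ring
    have hmax : (if p + T.getD (4 * s) 0 > b then p + T.getD (4 * s) 0 else b)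
        = max b (p + T.getD (4 * s) 0) := by
      rcases le_or_gt (p + T.getD (4 * s) 0) b with h | h
      · rw [if_neg (not_lt.mpr h), max_eq_left h]
      · rw [if_pos h, max_eq_right h.le]
    rw [List.length_cons, List.range_succ_eq_map, List.map_cons, List.map_map,
        List.foldl_cons]
    show pvAltGo (p :: ps') T ((4 * s : Nat) : Int) b = _
    rw [pvAltGo, hget, hstep, ih (s + 1) _, hmax]
    congr 1
    apply List.map_congr_left
    intro k _
    simp only [Function.comp_apply, List.getD_cons_succ]
    congr 2
    omega

theorem pvFoldlMax_init_le (l : List Int) (b : Int) : b ≤ List.foldl max b l := by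
  induction l generalizing b with
  | nil => simp
  | cons x t ih => exact le_trans (le_max_left b x) (ih (max b x))

theorem pvFoldlMax_mem_le (l : List Int) (b x : Int) (hx : x ∈ l) :
    x ≤ List.foldl max b l := by
  induction l generalizing b with
  | nil => simp at hx
  | cons y t ih =>
    rcases List.mem_cons.mp hx with h | h
    · subst h; exact le_trans (le_max_right b x) (pvFoldlMax_init_le t _)
    · exact ih _ h

theorem pvFoldlMax_mem (l : List Int) (b : Int) :
    List.foldl max b l ∈ b :: l := by
  induction l generalizing b with
  | nil => simp
  | cons y t ih =>
    rcases List.mem_cons.mp (ih (max b y)) with h | h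
    · rw [List.foldl_cons, h]
      rcases max_choice b y with h' | h' <;> rw [h']
      · exact List.mem_cons_self
      · exact List.mem_cons_of_mem _ List.mem_cons_self
    · exact List.mem_cons_of_mem _ (List.mem_cons_of_mem _ h)

-- B's body equals the max? of the n stride-4 pair sums
theorem pvMainB (P T : List Int) (hPne : P ≠ []) :
    pvAltGo P T 0 (PySem.List.pyGetD P 0 0 + PySem.List.pyGetD T 0 0)
      = (PySem.List.max?
          ((List.range P.length).map (fun k => P.getD k 0 + T.getD (4 * k) 0))
          (fun x => x)).getD 0 := by
  have hn : 0 < P.length := List.length_pos_iff.mpr hPne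
  set LB := (List.range P.length).map (fun k => P.getD k 0 + T.getD (4 * k) 0) with hLB
  have hb0 : PySem.List.pyGetD P 0 0 + PySem.List.pyGetD T 0 0
      = P.getD 0 0 + T.getD 0 0 := by
    simp [PySem.List.pyGetD_zero]
  have hb0mem : P.getD 0 0 + T.getD 0 0 ∈ LB := by
    rw [hLB]
    refine List.mem_map.mpr ⟨0, List.mem_range.mpr hn, ?_⟩
    norm_num
  have h0 : ((0 : Nat) : Int) = (0 : Int) := rfl
  have hgo : pvAltGo P T ((4 * 0 : Nat) : Int) (P.getD 0 0 + T.getD 0 0)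
      = List.foldl max (P.getD 0 0 + T.getD 0 0)
          ((List.range P.length).map (fun k => P.getD k 0 + T.getD (4 * (0 + k)) 0)) :=
    pvAltGo_eq T P 0 _
  simp only [Nat.mul_zero, Nat.cast_zero, Nat.zero_add] at hgo
  rw [hb0, hgo, ← hLB]
  cases hB : PySem.List.max? LB (fun x => x) with
  | none =>
    exfalso
    have h := (PySem.List.max?_eq_none_iff LB (fun x => x)).mp hB
    rw [h] at hb0mem
    simp at hb0mem
  | some m =>
    have hmem := PySem.List.max?_mem hB
    have hmax := PySem.List.max?_isMax hB
    simp only [Option.getD_some]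
    apply le_antisymm
    · rcases List.mem_cons.mp (pvFoldlMax_mem LB (P.getD 0 0 + T.getD 0 0)) with h | h
      · rw [h]; exact hmax _ hb0mem
      · exact hmax _ h
    · exact pvFoldlMax_mem_le LB _ m hmem

-- ===== VERDICT (by name: the statement is the Claim_ definition above) =====
theorem minimum_time_to_execute_all_tasks_spec : Claim_equal_minimum_time_to_execute_all_tasks := by
  intro processorTime tasks _ hpre
  obtain ⟨hne, hlen⟩ := hpre
  unfold Spec_minimum_time_to_execute_all_tasks
  have hPne : PySem.List.sorted processorTime (fun x => x) false ≠ [] := by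
    rw [Ne, PySem.List.sorted_eq_nil_iff]; exact hne
  have hTpair : List.Pairwise (fun a b => b ≤ a) (PySem.List.sorted tasks (fun x => x) true) :=
    PySem.List.sorted_pairwise_rev _ _
  have hlen4 : 4 * (PySem.List.sorted processorTime (fun x => x) false).length
      ≤ (PySem.List.sorted tasks (fun x => x) true).length := by
    rw [PySem.List.length_sorted, PySem.List.length_sorted]; exact hlen
  show (PySem.List.max? _ _).getD 0 = pvAltGo _ _ 0 _
  rw [pvMainA _ _ hPne hTpair hlen4, pvMainB _ _ hPne]
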